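-- pv_equiv track=rewrite | github.com/aimanhanif321/hacthon-0 | watchers/gmail_watcher.py | classify_email_priority
-- ===== SOURCE A (Python) =====
-- def classify_email_priority(subject: str, labels: list[str]) -> str:
--     """Classify email priority based on subject and labels."""
--     subject_lower = subject.lower()
--
--     if "IMPORTANT" in labels or "CATEGORY_PERSONAL" in labels:
--         if any(kw in subject_lower for kw in ["urgent", "asap", "critical", "payment", "invoice"]):
--             return "critical"
--         return "high"
--
--     if any(kw in subject_lower for kw in ["meeting", "deadline", "review", "action required"]):
--         return "high"
--
--     if any(kw in subject_lower for kw in ["update", "report", "summary", "fyi"]):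
--         return "medium"
--
--     return "low"
-- ===== SOURCE B (Python) =====
-- TIERS = ["low", "medium", "high", "critical"]
--
-- # flat keyword -> weight table: 3 = label-escalation keywords, 2 = high, 1 = medium
-- KEYWORD_WEIGHTS = [
--     ("urgent", 3), ("asap", 3), ("critical", 3), ("payment", 3), ("invoice", 3),
--     ("meeting", 2), ("deadline", 2), ("review", 2), ("action required", 2),
--     ("update", 1), ("report", 1), ("summary", 1), ("fyi", 1),
-- ]
--
--
-- def classify_email_priority(subject: str, labels: list[str]) -> str:
--     """Score-based: one pass over a flat keyword/weight table accumulates two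
--     numeric scores, which are combined arithmetically into an index into TIERS."""
--     s = subject.lower()
--     escal = 0   # 3 iff some weight-3 keyword occurs
--     plain = 0   # max weight among matched weight-1/2 keywords
--     for kw, w in KEYWORD_WEIGHTS:
--         if kw in s:
--             if w == 3:
--                 escal = 3
--             elif w > plain:
--                 plain = w
--     flagged = not {"IMPORTANT", "CATEGORY_PERSONAL"}.isdisjoint(labels)
--     level = (escal or 2) if flagged else plain
--     return TIERS[level]
-- ===== Notes on version B (the rewrite author's own statement) =====
-- stated objective: alternative
-- what changed: Replaced the nested if/return keyword-group chain by a single fold over one flat keyword->weight table that accumulates two numeric scores, combined arithmetically with the label flag into an index into a tier list.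
import Mathlib
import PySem

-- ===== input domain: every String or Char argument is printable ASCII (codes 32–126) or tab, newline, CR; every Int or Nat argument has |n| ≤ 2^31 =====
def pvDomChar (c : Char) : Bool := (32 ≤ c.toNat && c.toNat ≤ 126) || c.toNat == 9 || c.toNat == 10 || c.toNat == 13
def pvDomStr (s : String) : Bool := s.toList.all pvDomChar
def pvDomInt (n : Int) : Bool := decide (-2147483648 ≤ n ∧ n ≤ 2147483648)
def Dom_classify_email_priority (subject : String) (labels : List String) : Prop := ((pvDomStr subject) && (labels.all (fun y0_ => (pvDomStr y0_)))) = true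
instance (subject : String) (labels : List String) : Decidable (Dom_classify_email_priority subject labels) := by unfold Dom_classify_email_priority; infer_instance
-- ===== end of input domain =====

-- B replaces A's nested if/return keyword-group chain by a single fold over one flat keyword->weight table accumulating two numeric scores, combined arithmetically with the label flag into a tier-list index (alternative decomposition, same cost).


-- ===== PORT A =====
-- Port of A: nested if/return chain, literal.
def classify_email_priority (subject : String) (labels : List String) : String :=
  let subject_lower := PySem.Str.lower subject
  if labels.contains "IMPORTANT" || labels.contains "CATEGORY_PERSONAL" then
    if ["urgent", "asap", "critical", "payment", "invoice"].any (fun kw => PySem.Str.isIn kw subject_lower) then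
      "critical"
    else
      "high"
  else if ["meeting", "deadline", "review", "action required"].any (fun kw => PySem.Str.isIn kw subject_lower) then
    "high"
  else if ["update", "report", "summary", "fyi"].any (fun kw => PySem.Str.isIn kw subject_lower) then
    "medium"
  else
    "low"

-- ===== PORT B =====
-- B: one pass over a flat keyword→weight table accumulating (escal, plain) scores,
-- then an arithmetic combine with the label flag indexing into the tier list.
def pvTiers : List String := ["low", "medium", "high", "critical"]

def pvKeywordWeights : List (String × Int) :=
  [("urgent", 3), ("asap", 3), ("critical", 3), ("payment", 3), ("invoice", 3),
   ("meeting", 2), ("deadline", 2), ("review", 2), ("action required", 2),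
   ("update", 1), ("report", 1), ("summary", 1), ("fyi", 1)]

-- loop body of B's single pass
def pvStep (s : String) (ep : Int × Int) (kw_w : String × Int) : Int × Int :=
  if PySem.Str.isIn kw_w.1 s then
    if kw_w.2 == 3 then (3, ep.2)
    else if kw_w.2 > ep.2 then (ep.1, kw_w.2)
    else ep
  else ep

def classify_email_priority_alt (subject : String) (labels : List String) : String :=
  let s := PySem.Str.lower subject
  let acc := pvKeywordWeights.foldl (pvStep s) (0, 0)
  let flagged := labels.contains "IMPORTANT" || labels.contains "CATEGORY_PERSONAL"
  let level : Int := if flagged then (if acc.1 ≠ 0 then acc.1 else 2) else acc.2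
  -- level is always in [0, 3], so the Option default is unreachable
  (PySem.List.pyGet? pvTiers level).getD ""

-- ===== PRECONDITION & SPEC =====
def Spec_classify_email_priority (subject : String) (labels : List String) (out : String) : Prop := out = classify_email_priority_alt subject labels
instance (subject : String) (labels : List String) (out : String) : Decidable (Spec_classify_email_priority subject labels out) := by unfold Spec_classify_email_priority; infer_instance

-- ===== CLAIM (what is proved, stated in full; the proofs are below) =====
def Claim_equal_classify_email_priority : Prop := ∀ (subject : String) (labels : List String), Dom_classify_email_priority subject labels → Spec_classify_email_priority subject labels (classify_email_priority subject labels)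

-- ===== LEMMAS AND PROOFS =====

-- folding a weight-3 group sets the first component iff some keyword occurs
theorem pv_fold3 (s : String) (kws : List String) (e p : Int) :
    (kws.map (fun k => (k, (3:Int)))).foldl (pvStep s) (e, p)
      = ((if kws.any (fun kw => PySem.Str.isIn kw s) then 3 else e), p) := by
  induction kws generalizing e with
  | nil => simp
  | cons k rest ih =>
    simp only [List.map_cons, List.foldl_cons, List.any_cons, pvStep, PySem.Str.isIn]
    by_cases hk : PySem.Chars.isIn k.toList s.toList = true <;>
      simp [hk, ih, PySem.Str.isIn]

-- folding a non-escalation group whose weight does not exceed the current plain score is a no-op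
theorem pv_fold_keep (s : String) (w : Int) (hw : ¬ w = 3) (kws : List String) (e p : Int)
    (hp : ¬ w > p) :
    (kws.map (fun k => (k, w))).foldl (pvStep s) (e, p) = (e, p) := by
  induction kws with
  | nil => simp
  | cons k rest ih =>
    simp only [List.map_cons, List.foldl_cons, pvStep, PySem.Str.isIn]
    by_cases hk : PySem.Chars.isIn k.toList s.toList = true <;> simp [hk, hw, hp, ih]

-- folding a non-escalation group of positive weight from plain score 0 yields w iff some keyword occurs
theorem pv_fold_up (s : String) (w : Int) (hw : ¬ w = 3) (kws : List String) (e : Int)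
    (hpos : 0 < w) :
    (kws.map (fun k => (k, w))).foldl (pvStep s) (e, 0)
      = (e, if kws.any (fun kw => PySem.Str.isIn kw s) then w else 0) := by
  induction kws with
  | nil => simp
  | cons k rest ih =>
    simp only [List.map_cons, List.foldl_cons, List.any_cons, pvStep, PySem.Str.isIn]
    by_cases hk : PySem.Chars.isIn k.toList s.toList = true
    · simp [hk, hw, hpos, pv_fold_keep s w hw rest e w (by omega)]
    · simp [hk, ih, PySem.Str.isIn]

-- the final arithmetic combine + tier lookup agrees with A's if/return chain
theorem pv_bridge (f u h m : Bool) :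
    (if f then (if u then "critical" else "high")
     else if h then "high" else if m then "medium" else "low")
    = (let acc : Int × Int := ((if u then 3 else 0), (if h then 2 else if m then 1 else 0));
       let level : Int := if f then (if acc.1 ≠ 0 then acc.1 else 2) else acc.2;
       (PySem.List.pyGet? pvTiers level).getD "") := by
  cases f <;> cases u <;> cases h <;> cases m <;> rfl

-- ===== VERDICT (by name: the statement is the Claim_ definition above) =====
theorem classify_email_priority_spec : Claim_equal_classify_email_priority := by
  intro subject labels _
  unfold Spec_classify_email_priority
  simp only [classify_email_priority, classify_email_priority_alt]
  rw [show pvKeywordWeights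
        = (["urgent", "asap", "critical", "payment", "invoice"].map (fun k => (k, (3:Int))))
          ++ ((["meeting", "deadline", "review", "action required"].map (fun k => (k, (2:Int))))
          ++ (["update", "report", "summary", "fyi"].map (fun k => (k, (1:Int))))) from rfl,
      List.foldl_append, List.foldl_append, pv_fold3]
  by_cases hh : (["meeting", "deadline", "review", "action required"].any
      (fun kw => PySem.Str.isIn kw (PySem.Str.lower subject))) = true
  · rw [pv_fold_up (PySem.Str.lower subject) 2 (by omega) _ _ (by omega), hh]
    try simp only [reduceIte]
    rw [pv_fold_keep (PySem.Str.lower subject) 1 (by omega) _ _ 2 (by omega)]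
    simpa using pv_bridge (labels.contains "IMPORTANT" || labels.contains "CATEGORY_PERSONAL")
      (["urgent", "asap", "critical", "payment", "invoice"].any
        (fun kw => PySem.Str.isIn kw (PySem.Str.lower subject))) true
      (["update", "report", "summary", "fyi"].any
        (fun kw => PySem.Str.isIn kw (PySem.Str.lower subject)))
  · rw [Bool.not_eq_true] at hh
    rw [pv_fold_up (PySem.Str.lower subject) 2 (by omega) _ _ (by omega), hh]
    simp only [Bool.false_eq_true, if_false]
    rw [pv_fold_up (PySem.Str.lower subject) 1 (by omega) _ _ (by omega)]
    simpa using pv_bridge (labels.contains "IMPORTANT" || labels.contains "CATEGORY_PERSONAL")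
      (["urgent", "asap", "critical", "payment", "invoice"].any
        (fun kw => PySem.Str.isIn kw (PySem.Str.lower subject))) false
      (["update", "report", "summary", "fyi"].any
        (fun kw => PySem.Str.isIn kw (PySem.Str.lower subject)))
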